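-- pv_equiv track=rewrite | github.com/cfevrius/CodingBat | source/array2.py | zero_max
-- ===== SOURCE A (Python) =====
-- def zero_max(nums):
--     """Return a version of the given array where each zero value in the array is replaced by the
--     largest odd value to the right of the zero in the array. If there is no odd value to the
--     right of the zero, leave the zero as a zero.
--     """
--     def largest_odd_value_to_right(index):
--         odd_numbers_to_right = [v for v in nums[index:] if v % 2 != 0]
--         return max(odd_numbers_to_right, default=0)
--
--     indices_of_zeroes = [i for i, val in enumerate(nums) if val == 0]
--     result = nums[:]
--     for index in indices_of_zeroes:
--         result[index] = largest_odd_value_to_right(index)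
--     return result
-- ===== SOURCE B (Python) =====
-- def zero_max(nums):
--     out = []
--     best = None
--     for v in reversed(nums):
--         if v == 0 and best is not None:
--             out.append(best)
--         else:
--             out.append(v)
--         if v % 2 != 0 and (best is None or v > best):
--             best = v
--     out.reverse()
--     return out
-- ===== Notes on version B (the rewrite author's own statement) =====
-- stated objective: alternative
-- what changed: Replaced the per-zero rescan of the remaining suffix (slice + filter + max for every zero) by a single right-to-left pass that threads the running largest odd value seen so far; intended as asymptotically faster (O(n) vs O(n^2) when zeros are dense), but the random-input a timing run measured only ~1.5x at the largest size, so no speed is claimed.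
import Mathlib
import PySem

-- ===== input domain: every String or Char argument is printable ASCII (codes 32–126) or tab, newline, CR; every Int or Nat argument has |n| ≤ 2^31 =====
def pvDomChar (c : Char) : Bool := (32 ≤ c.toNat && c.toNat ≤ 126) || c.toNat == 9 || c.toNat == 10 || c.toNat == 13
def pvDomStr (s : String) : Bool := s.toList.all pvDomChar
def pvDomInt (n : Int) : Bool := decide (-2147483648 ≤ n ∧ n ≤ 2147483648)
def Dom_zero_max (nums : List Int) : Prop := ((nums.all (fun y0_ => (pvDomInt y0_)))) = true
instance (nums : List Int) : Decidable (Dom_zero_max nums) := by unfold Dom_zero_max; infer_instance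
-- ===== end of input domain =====

-- B replaces A's per-zero rescan of the suffix by one right-to-left pass carrying the running largest odd value.

-- ===== PORT A =====
-- helper largest_odd_value_to_right: [v for v in nums[index:] if v % 2 != 0], max(..., default=0)
def zmLargest (nums : List Int) (index : Int) : Int :=
  let odds := (PySem.List.slice nums (some index) none).filter (fun v => PySem.Int.mod v 2 != 0)
  (PySem.List.max? odds (fun y => y)).getD 0

def zero_max (nums : List Int) : List Int :=
  let indices_of_zeroes := ((PySem.List.enumerate nums 0).filter (fun p => p.2 == 0)).map (·.1)
  let result := nums          -- nums[:]
  indices_of_zeroes.foldl (fun res index => res.set index.toNat (zmLargest nums index)) result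

-- ===== PORT B =====
-- if v % 2 != 0 and (best is None or v > best): best = v
def zmUpd (best : Option Int) (v : Int) : Option Int :=
  if PySem.Int.mod v 2 != 0 && (best.isNone || decide (v > best.getD 0)) then some v else best

-- the loop body: emit best for a zero when best exists, else the value; thread best
def zmGo : List Int → Option Int → List Int
  | [], _ => []
  | v :: rest, best =>
    (if v == 0 && best.isSome then best.getD 0 else v) :: zmGo rest (zmUpd best v)

def zero_max_alt (nums : List Int) : List Int :=
  (zmGo nums.reverse none).reverse

-- ===== PRECONDITION & SPEC =====
def Spec_zero_max (nums : List Int) (out : List Int) : Prop := out = zero_max_alt nums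
instance (nums : List Int) (out : List Int) : Decidable (Spec_zero_max nums out) := by unfold Spec_zero_max; infer_instance

-- ===== CLAIM (what is proved, stated in full; the proofs are below) =====
def Claim_equal_zero_max : Prop := ∀ (nums : List Int), Dom_zero_max nums → Spec_zero_max nums (zero_max nums)

-- ===== LEMMAS AND PROOFS =====

-- running best over a list of elements to the right, processed right-to-left, seeded with b
def bestR (l : List Int) (b : Option Int) : Option Int :=
  l.foldr (fun v a => zmUpd a v) b

-- left-to-right specification of B's output
def gB : List Int → Option Int → List Int
  | [], _ => []
  | v :: rest, b =>
    (if v == 0 && (bestR rest b).isSome then (bestR rest b).getD 0 else v) :: gB rest b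

theorem bestR_append (l : List Int) (v : Int) (b : Option Int) :
    bestR (l ++ [v]) b = bestR l (zmUpd b v) := by
  simp [bestR]

theorem gB_snoc (l : List Int) (v : Int) (b : Option Int) :
    gB (l ++ [v]) b = gB l (zmUpd b v) ++ [(if v == 0 && b.isSome then b.getD 0 else v)] := by
  induction l with
  | nil => simp [gB, bestR]
  | cons w rest ih => simp [gB, bestR_append, ih]

theorem zmGo_reverse (l : List Int) (b : Option Int) :
    zmGo l.reverse b = (gB l b).reverse := by
  induction l using List.reverseRecOn generalizing b with
  | nil => simp [zmGo, gB]
  | append_singleton rest v ih =>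
      rw [List.reverse_append]
      simp only [List.reverse_singleton, List.singleton_append, zmGo, gB_snoc,
        List.reverse_append, List.reverse_singleton, List.singleton_append]
      rw [ih]

theorem zero_max_alt_eq_gB (nums : List Int) : zero_max_alt nums = gB nums none := by
  simp [zero_max_alt, zmGo_reverse]

theorem length_gB (l : List Int) (b : Option Int) : (gB l b).length = l.length := by
  induction l with
  | nil => simp [gB]
  | cons v rest ih => simp [gB, ih]

theorem getElem?_gB (l : List Int) (b : Option Int) (j : Nat) (hj : j < l.length) :
    (gB l b)[j]? =
      some (if l[j] == 0 && (bestR (l.drop (j+1)) b).isSome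
        then (bestR (l.drop (j+1)) b).getD 0 else l[j]) := by
  induction l generalizing j with
  | nil => simp at hj
  | cons v rest ih =>
      cases j with
      | zero => simp [gB]
      | succ k =>
          have hk : k < rest.length := by simpa using hj
          simpa [gB] using ih k hk

-- bestR with seed none computes max of the odd elements (none when there are none)
theorem bestR_eq_max? (l : List Int) :
    bestR l none =
      PySem.List.max? (l.filter (fun v => PySem.Int.mod v 2 != 0)) (fun y => y) := by
  induction l with
  | nil => simp [bestR, PySem.List.max?]
  | cons v rest ih =>
      have hstep : bestR (v :: rest) none = zmUpd (bestR rest none) v := by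
        simp [bestR]
      have hm : PySem.Int.mod v 2 = v % 2 := PySem.Int.mod_eq_emod_of_pos (by norm_num)
      rw [hstep, ih]
      by_cases hodd : PySem.Int.mod v 2 != 0
      · have hodd2 : v % 2 = 1 := by
          rw [hm] at hodd
          rcases Int.emod_two_eq v with h | h
          · simp [h] at hodd
          · exact h
        have hfc : List.filter (fun w => PySem.Int.mod w 2 != 0) (v :: rest)
            = v :: rest.filter (fun w => PySem.Int.mod w 2 != 0) :=
          List.filter_cons_of_pos hodd
        rw [hfc]
        cases hfr : rest.filter (fun v => PySem.Int.mod v 2 != 0) with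
        | nil => simp [zmUpd, hodd2, PySem.List.max?]
        | cons x t =>
            rw [PySem.List.max?_id_cons, PySem.List.max?_id_cons]
            have hassoc : List.foldl max v (x :: t) = max v (List.foldl max x t) := by
              simpa using (List.foldl_assoc (op := (max : Int → Int → Int))
                (l := t) (a₁ := v) (a₂ := x))
            by_cases hgt : v > List.foldl max x t
            · simp [zmUpd, hodd2, hgt, hassoc, max_eq_left (le_of_lt hgt)]
            · simp [zmUpd, hodd2, hgt, hassoc, max_eq_right (le_of_not_gt hgt)]
      · have hodd2 : v % 2 = 0 := by
          rw [hm] at hodd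
          rcases Int.emod_two_eq v with h | h
          · exact h
          · simp [h] at hodd
        have hfc : List.filter (fun w => PySem.Int.mod w 2 != 0) (v :: rest)
            = rest.filter (fun w => PySem.Int.mod w 2 != 0) :=
          List.filter_cons_of_neg hodd
        rw [hfc]
        simp [zmUpd, hodd2]

-- length of A's fold of sets
theorem length_fold_set (nums : List Int) (idxs : List Int) (acc : List Int) :
    (idxs.foldl (fun res index => res.set index.toNat (zmLargest nums index)) acc).length
      = acc.length := by
  induction idxs generalizing acc with
  | nil => rfl
  | cons i t ih => simp [List.foldl_cons, ih]

-- elementwise value of A's fold of sets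
theorem getElem?_fold_set (nums : List Int) (idxs : List Int) (acc : List Int)
    (hidx : ∀ i ∈ idxs, ∃ k : Nat, i = (k : Int) ∧ k < acc.length)
    (j : Nat) :
    (idxs.foldl (fun res index => res.set index.toNat (zmLargest nums index)) acc)[j]? =
      (if (j : Int) ∈ idxs then some (zmLargest nums (j : Int)) else acc[j]?) := by
  induction idxs generalizing acc with
  | nil => simp
  | cons i t ih =>
      obtain ⟨k, hk, hklt⟩ := hidx i (by simp)
      have hidx' : ∀ x ∈ t, ∃ m : Nat, x = (m : Int) ∧ m < (acc.set i.toNat (zmLargest nums i)).length := by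
        intro x hx
        obtain ⟨m, hm1, hm2⟩ := hidx x (by simp [hx])
        exact ⟨m, hm1, by simpa using hm2⟩
      rw [List.foldl_cons, ih (acc.set i.toNat (zmLargest nums i)) hidx']
      by_cases hmem : (j : Int) ∈ t
      · simp [hmem]
      · by_cases heq : (j : Int) = i
        · subst hk
          have hkj : k = j := by omega
          subst hkj
          have htn : ((k : Int)).toNat = k := Int.toNat_natCast k
          rw [if_neg hmem, if_pos (by simp), htn, List.getElem?_set_eq_of_lt _ hklt]
        · have hne : i.toNat ≠ j := by
            subst hk; intro h; apply heq; omega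
          simp [hmem, heq, List.getElem?_set_ne hne]

theorem mem_indices_iff (nums : List Int) (j : Nat) (hj : j < nums.length) :
    ((j : Int) ∈ ((PySem.List.enumerate nums 0).filter (fun p => p.2 == 0)).map (·.1))
      ↔ nums[j] = 0 := by
  simp only [List.mem_map, List.mem_filter, PySem.List.mem_enumerate_iff]
  constructor
  · rintro ⟨⟨a, b⟩, ⟨⟨k, hk, hp⟩, hz⟩, hfst⟩
    obtain ⟨h1, h2⟩ := Prod.mk.injEq .. ▸ hp
    simp only at hfst hz
    have : k = j := by omega
    subst this
    simpa [h2] using hz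
  · intro hz
    exact ⟨((j : Int), nums[j]), ⟨⟨j, hj, by simp⟩, by simpa using hz⟩, rfl⟩

theorem indices_shape (nums : List Int) :
    ∀ i ∈ ((PySem.List.enumerate nums 0).filter (fun p => p.2 == 0)).map (·.1),
      ∃ k : Nat, i = (k : Int) ∧ k < nums.length := by
  intro i hi
  simp only [List.mem_map, List.mem_filter, PySem.List.mem_enumerate_iff] at hi
  obtain ⟨⟨a, b⟩, ⟨⟨k, hk, hp⟩, _⟩, hfst⟩ := hi
  obtain ⟨h1, _⟩ := Prod.mk.injEq .. ▸ hp
  exact ⟨k, by simp only at hfst; omega, hk⟩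

-- A's helper at a zero position equals the right-suffix odd maximum (default 0)
theorem zmLargest_at_zero (nums : List Int) (j : Nat) (hj : j < nums.length)
    (hz : nums[j] = 0) :
    zmLargest nums (j : Int) = (bestR (nums.drop (j+1)) none).getD 0 := by
  have hdrop : nums.drop j = nums[j] :: nums.drop (j+1) := List.drop_eq_getElem_cons hj
  rw [zmLargest, bestR_eq_max?]
  simp only [PySem.List.slice_from_natCast, hdrop, hz]
  rw [List.filter_cons_of_neg (by simp [PySem.Int.mod])]

theorem zero_max_eq_gB (nums : List Int) : zero_max nums = gB nums none := by
  have hdef : zero_max nums =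
      (((PySem.List.enumerate nums 0).filter (fun p => p.2 == 0)).map (·.1)).foldl
        (fun res index => res.set index.toNat (zmLargest nums index)) nums := rfl
  apply List.ext_getElem?
  intro j
  by_cases hjn : j < nums.length
  · have hA := getElem?_fold_set nums
      (((PySem.List.enumerate nums 0).filter (fun p => p.2 == 0)).map (·.1)) nums
      (indices_shape nums) j
    have hB := getElem?_gB nums none j hjn
    rw [hdef, hA, hB]
    by_cases hz : nums[j] = 0
    · rw [if_pos ((mem_indices_iff nums j hjn).mpr hz)]
      rw [zmLargest_at_zero nums j hjn hz]
      cases bestR (nums.drop (j+1)) none with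
      | none => simp [hz]
      | some m => simp [hz]
    · rw [if_neg (fun h => hz ((mem_indices_iff nums j hjn).mp h))]
      simp [hz, List.getElem?_eq_getElem hjn]
  · rw [List.getElem?_eq_none (by rw [hdef, length_fold_set]; omega),
        List.getElem?_eq_none (by rw [length_gB]; omega)]

-- ===== VERDICT (by name: the statement is the Claim_ definition above) =====
theorem zero_max_spec : Claim_equal_zero_max := by
  intro nums _
  unfold Spec_zero_max
  rw [zero_max_eq_gB, zero_max_alt_eq_gB]
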